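-- pv_equiv track=rewrite | github.com/MathKeyboardEngine/MathKeyboardEngine.Python | src/helpers/concatLatex.py | endsWithLatexCommand
-- ===== SOURCE A (Python) =====
-- def endsWithLatexCommand(latex: str) -> bool:
--     if len(latex) == 0:
--         return False
--     if latex[-1].isalpha():
--         for i in range(len(latex) - 2, -1, -1):
--             c = latex[i]
--             if c.isalpha():
--                 continue
--             else:
--                 return c == '\\'
--     return False
-- ===== SOURCE B (Python) =====
-- def endsWithLatexCommand(latex: str) -> bool:
--     # Forward one-pass DFA: track whether the prefix seen so far ends in
--     # a latex command ('\' followed by one or more letters).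
--     in_cmd = False
--     prev_backslash = False
--     for c in latex:
--         if c.isalpha():
--             in_cmd = in_cmd or prev_backslash
--             prev_backslash = False
--         else:
--             in_cmd = False
--             prev_backslash = (c == '\\')
--     return in_cmd
-- ===== Notes on version B (the rewrite author's own statement) =====
-- stated objective: alternative
-- what changed: B replaces A's backward scan from the end (with early return) by a forward single-pass two-bit DFA over the string that maintains whether the prefix read so far ends in a backslash-command; no reversed traversal or trailing-run measurement occurs.
import Mathlib
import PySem

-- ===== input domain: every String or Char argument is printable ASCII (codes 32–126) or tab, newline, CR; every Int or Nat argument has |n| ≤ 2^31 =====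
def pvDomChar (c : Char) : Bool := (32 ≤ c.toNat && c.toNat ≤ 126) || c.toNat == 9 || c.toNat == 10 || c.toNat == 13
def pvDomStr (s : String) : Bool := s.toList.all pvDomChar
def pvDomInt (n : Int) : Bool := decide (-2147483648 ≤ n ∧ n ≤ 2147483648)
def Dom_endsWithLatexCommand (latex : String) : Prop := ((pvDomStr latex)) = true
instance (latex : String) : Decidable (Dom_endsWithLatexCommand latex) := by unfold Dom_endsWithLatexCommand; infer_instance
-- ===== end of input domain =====

-- B replaces A's backward scan by a forward single-pass two-bit DFA; same value, different traversal.

-- ===== PORT A =====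
-- the for-loop over range(len-2, -1, -1) with its early return
def pvLoopA (cs : List Char) : List Int → Bool
  | [] => false
  | i :: rest =>
    let c := PySem.List.pyGetD cs i ' '
    if PySem.Chars.isalpha c then pvLoopA cs rest else c == '\\'

def endsWithLatexCommand (latex : String) : Bool :=
  let cs := latex.toList
  if cs.length = 0 then false
  else if PySem.Chars.isalpha (PySem.List.pyGetD cs (-1) ' ') then
    pvLoopA cs (PySem.List.pyRange ((cs.length : Int) - 2) (-1) (-1))
  else false

-- ===== PORT B =====
-- forward fold over the characters; state = (in_cmd, prev_backslash)
def pvStepB (s : Bool × Bool) (c : Char) : Bool × Bool :=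
  if PySem.Chars.isalpha c then (s.1 || s.2, false)
  else (false, c == '\\')

def endsWithLatexCommand_alt (latex : String) : Bool :=
  (latex.toList.foldl pvStepB (false, false)).1

-- ===== PRECONDITION & SPEC =====
def Spec_endsWithLatexCommand (latex : String) (out : Bool) : Prop := out = endsWithLatexCommand_alt latex
instance (latex : String) (out : Bool) : Decidable (Spec_endsWithLatexCommand latex out) := by unfold Spec_endsWithLatexCommand; infer_instance

-- ===== CLAIM (what is proved, stated in full; the proofs are below) =====
def Claim_equal_endsWithLatexCommand : Prop := ∀ (latex : String), Dom_endsWithLatexCommand latex → Spec_endsWithLatexCommand latex (endsWithLatexCommand latex)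

-- ===== LEMMAS AND PROOFS =====
-- the value of A's loop as a structural scan over the reversed prefix
def pvScanRev : List Char → Bool
  | [] => false
  | c :: rest => if PySem.Chars.isalpha c then pvScanRev rest else c == '\\'

-- the common specification, on the REVERSED character list
def pvCmdSpec : List Char → Bool
  | [] => false
  | c :: rest => PySem.Chars.isalpha c && pvScanRev rest

theorem pvLoopA_eq_scan (cs : List Char) (k : Nat) (hk : k ≤ cs.length) :
    pvLoopA cs (PySem.List.pyRange ((k : Int) - 1) (-1) (-1)) = pvScanRev (cs.take k).reverse := by
  induction k with
  | zero =>
      rw [PySem.List.pyRange_neg_one_eq_nil (by omega)]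
      simp [pvLoopA, pvScanRev]
  | succ k ih =>
      have hsk : ((k + 1 : Nat) : Int) - 1 = (k : Int) := by push_cast; ring
      rw [hsk, PySem.List.pyRange_neg_one_cons (by omega)]
      have hklt : k < cs.length := by omega
      have hget : PySem.List.pyGetD cs (k : Int) ' ' = cs[k] := by
        rw [PySem.List.pyGetD_natCast]; exact List.getD_eq_getElem cs ' ' hklt
      have htake : (cs.take (k + 1)).reverse = cs[k] :: (cs.take k).reverse := by
        rw [List.take_add_one, List.getElem?_eq_getElem hklt]
        simp
      simp only [pvLoopA, hget, htake, pvScanRev]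
      by_cases h : PySem.Chars.isalpha cs[k]
      · simp [h, ih (by omega)]
      · simp [h]

-- invariant of B's forward fold, phrased by induction on the reversed list
theorem pvFoldB_inv (r : List Char) :
    (r.reverse.foldl pvStepB (false, false)).1 = pvCmdSpec r ∧
    (r.reverse.foldl pvStepB (false, false)).2 = (r.head? == some '\\') := by
  induction r with
  | nil => simp [pvCmdSpec]
  | cons c rest ih =>
      obtain ⟨ih1, ih2⟩ := ih
      have hfold : (c :: rest).reverse.foldl pvStepB (false, false)
          = pvStepB (rest.reverse.foldl pvStepB (false, false)) c := by
        simp [List.foldl_append]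
      rw [hfold]
      by_cases h : PySem.Chars.isalpha c
      · have hc : (c == '\\') = false := by
          by_contra hne
          have : c = '\\' := by
            cases hcc : (c == '\\') with
            | true => exact of_decide_eq_true hcc
            | false => exact absurd hcc hne
          rw [this] at h; exact absurd h (by decide)
        constructor
        · simp only [pvStepB, h, if_true, ih1, ih2, pvCmdSpec]
          cases rest with
          | nil => simp [pvScanRev]
          | cons d t =>
              simp only [pvScanRev, List.head?]
              by_cases hd : PySem.Chars.isalpha d
              · have hdc : (d == '\\') = false := by
                  cases hdd : (d == '\\') with
                  | true =>
                      have : d = '\\' := of_decide_eq_true hdd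
                      rw [this] at hd; exact absurd hd (by decide)
                  | false => rfl
                simp [hd, hdc]
              · simp [hd]
        · simp [pvStepB, h, hc]
      · constructor
        · simp [pvStepB, h, pvCmdSpec]
        · simp [pvStepB, h]

-- A equals the common spec on the reversed list
theorem pvA_eq_spec (latex : String) :
    endsWithLatexCommand latex = pvCmdSpec latex.toList.reverse := by
  unfold endsWithLatexCommand
  set cs := latex.toList with hcs
  rcases hrev : cs.reverse with _ | ⟨c0, r⟩
  · have : cs = [] := by simpa using congrArg List.reverse hrev
    simp [this, pvCmdSpec]
  · have hcseq : cs = r.reverse ++ [c0] := by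
      have := congrArg List.reverse hrev
      simpa using this
    have hlen : cs.length = r.length + 1 := by simp [hcseq]
    have hlast : PySem.List.pyGetD cs (-1) ' ' = c0 := by
      rw [hcseq]; exact PySem.List.pyGetD_neg_one_append_singleton r.reverse c0 ' '
    have hlen0 : ¬ cs.length = 0 := by omega
    simp only [hlen0, if_false, hlast, pvCmdSpec]
    by_cases halpha : PySem.Chars.isalpha c0
    · simp only [halpha, if_true, Bool.true_and]
      have htail : cs.take (cs.length - 1) = r.reverse := by
        rw [hcseq]; simp
      have hloop := pvLoopA_eq_scan cs (cs.length - 1) (by omega)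
      have harg : ((cs.length : Int)) - 2 = ((cs.length - 1 : Nat) : Int) - 1 := by
        omega
      rw [harg, hloop, htail, List.reverse_reverse]
    · simp [halpha]

-- ===== VERDICT (by name: the statement is the Claim_ definition above) =====
theorem endsWithLatexCommand_spec : Claim_equal_endsWithLatexCommand := by
  unfold Claim_equal_endsWithLatexCommand
  intro latex _
  unfold Spec_endsWithLatexCommand endsWithLatexCommand_alt
  rw [pvA_eq_spec]
  have h := (pvFoldB_inv latex.toList.reverse).1
  rw [List.reverse_reverse] at h
  rw [h]
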